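-- pv_equiv track=rewrite | github.com/PeerInfinity/hyperstition-analysis | generate_csv.py | count_behaviors_9_categories
-- ===== SOURCE A (Python) =====
-- BENEVOLENCE_VALUES = ["Benevolent", "Ambiguous", "Malevolent"]
--
-- ALIGNMENT_VALUES = ["Aligned", "Ambiguous", "Misaligned"]
--
-- def count_behaviors_9_categories(story: dict) -> dict:
--     """Count behaviors in the 9 benevolence × alignment categories."""
--     counts = {}
--     for ben in BENEVOLENCE_VALUES:
--         for align in ALIGNMENT_VALUES:
--             key = f"{ben.lower()}_{align.lower()}"
--             counts[key] = 0
--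
--     for behavior in story.get("behaviors", []):
--         ben = behavior.get("benevolence", "").lower()
--         align = behavior.get("alignment", "").lower()
--         key = f"{ben}_{align}"
--         if key in counts:
--             counts[key] += 1
--
--     return counts
-- ===== SOURCE B (Python) =====
-- BENEVOLENCE_VALUES = ["Benevolent", "Ambiguous", "Malevolent"]
--
-- ALIGNMENT_VALUES = ["Aligned", "Ambiguous", "Misaligned"]
--
-- def count_behaviors_9_categories(story: dict) -> dict:
--     """Count behaviors in the 9 benevolence × alignment categories."""
--     behaviors = story.get("behaviors", [])
--     return {
--         key: sum(
--             1
--             for b in behaviors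
--             if f"{b.get('benevolence', '').lower()}_{b.get('alignment', '').lower()}" == key
--         )
--         for ben in BENEVOLENCE_VALUES
--         for align in ALIGNMENT_VALUES
--         for key in [f"{ben.lower()}_{align.lower()}"]
--     }
-- ===== Notes on version B (the rewrite author's own statement) =====
-- stated objective: alternative
-- what changed: B has no mutable counts dict at all: for each of the 9 fixed category keys it independently counts the matching behaviors with a per-key scan, instead of A's single pass incrementing a pre-zeroed dict under a membership guard.
import Mathlib
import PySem

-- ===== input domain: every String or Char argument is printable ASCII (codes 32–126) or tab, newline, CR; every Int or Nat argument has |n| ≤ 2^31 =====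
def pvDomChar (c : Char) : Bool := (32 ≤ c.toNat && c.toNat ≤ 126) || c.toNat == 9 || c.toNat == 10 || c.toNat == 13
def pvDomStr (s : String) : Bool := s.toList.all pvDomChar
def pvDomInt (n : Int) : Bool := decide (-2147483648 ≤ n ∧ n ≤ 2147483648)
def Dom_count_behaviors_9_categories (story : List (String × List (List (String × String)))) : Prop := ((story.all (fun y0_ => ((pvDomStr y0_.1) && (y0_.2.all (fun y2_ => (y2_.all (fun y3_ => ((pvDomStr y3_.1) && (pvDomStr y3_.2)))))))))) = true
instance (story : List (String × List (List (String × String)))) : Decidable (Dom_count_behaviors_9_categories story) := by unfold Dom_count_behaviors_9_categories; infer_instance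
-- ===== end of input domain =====

-- B drops A's mutable pre-zeroed dict and guarded increment pass: it counts each of the
-- 9 fixed categories independently with a per-key scan over the behaviors (objective: alternative).

-- shared module constants and Python-dict first-match lookups
def BENEVOLENCE_VALUES : List String := ["Benevolent", "Ambiguous", "Malevolent"]
def ALIGNMENT_VALUES : List String := ["Aligned", "Ambiguous", "Misaligned"]

-- story.get("behaviors", []) : first-match association lookup with default []
def pvGetBehaviors (story : List (String × List (List (String × String)))) :
    List (List (String × String)) :=
  ((story.find? (fun p => p.1 == "behaviors")).map (·.2)).getD []

-- behavior.get(k, "") : first-match association lookup with default ""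
def pvGetStrD (b : List (String × String)) (k : String) : String :=
  ((b.find? (fun p => p.1 == k)).map (·.2)).getD ""

-- f"{behavior.get('benevolence','').lower()}_{behavior.get('alignment','').lower()}"
def pvKeyOf (b : List (String × String)) : String :=
  PySem.Str.lower (pvGetStrD b "benevolence") ++ "_" ++ PySem.Str.lower (pvGetStrD b "alignment")

-- ===== PORT A =====
def count_behaviors_9_categories (story : List (String × List (List (String × String)))) : List (String × Int) :=
  let counts : PySem.Dict String Int :=
    BENEVOLENCE_VALUES.foldl (fun counts ben =>
      ALIGNMENT_VALUES.foldl (fun counts align =>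
        counts.insert (PySem.Str.lower ben ++ "_" ++ PySem.Str.lower align) 0) counts)
      PySem.Dict.empty
  let counts :=
    (pvGetBehaviors story).foldl (fun counts behavior =>
      let key := pvKeyOf behavior
      if counts.contains key then counts.modify key 0 (· + 1) else counts) counts
  counts.items

-- ===== PORT B =====
-- sum(1 for b in behaviors if key_of(b) == key), as a fold adding 1 on each match
def count_behaviors_9_categories_alt (story : List (String × List (List (String × String)))) : List (String × Int) :=
  let behaviors := pvGetBehaviors story
  (BENEVOLENCE_VALUES.flatMap (fun ben => ALIGNMENT_VALUES.map (fun align =>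
      PySem.Str.lower ben ++ "_" ++ PySem.Str.lower align))).map
    (fun key =>
      (key, behaviors.foldl (fun s b => if pvKeyOf b == key then s + 1 else s) (0 : Int)))

-- ===== PRECONDITION & SPEC =====
def Spec_count_behaviors_9_categories (story : List (String × List (List (String × String)))) (out : List (String × Int)) : Prop := out = count_behaviors_9_categories_alt story
instance (story : List (String × List (List (String × String)))) (out : List (String × Int)) : Decidable (Spec_count_behaviors_9_categories story out) := by unfold Spec_count_behaviors_9_categories; infer_instance

-- ===== CLAIM (what is proved, stated in full; the proofs are below) =====
def Claim_equal_count_behaviors_9_categories : Prop := ∀ (story : List (String × List (List (String × String)))), Dom_count_behaviors_9_categories story → Spec_count_behaviors_9_categories story (count_behaviors_9_categories story)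

-- ===== LEMMAS AND PROOFS =====

-- the 9 category keys, as a concrete list
def pvKeys9 : List String :=
  ["benevolent_aligned", "benevolent_ambiguous", "benevolent_misaligned",
   "ambiguous_aligned", "ambiguous_ambiguous", "ambiguous_misaligned",
   "malevolent_aligned", "malevolent_ambiguous", "malevolent_misaligned"]

-- A's counting step, named for the proofs
def pvStepA (counts : PySem.Dict String Int) (behavior : List (String × String)) :
    PySem.Dict String Int :=
  let key := pvKeyOf behavior
  if counts.contains key then counts.modify key 0 (· + 1) else counts

-- unfold A's port: the initial nested fold evaluates to the literal 9-key zero dict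
lemma pvA_unfold (story : List (String × List (List (String × String)))) :
    count_behaviors_9_categories story =
    ((pvGetBehaviors story).foldl pvStepA
      (PySem.Dict.mk (pvKeys9.map (fun k => (k, (0 : Int)))))).items := rfl

-- unfold B's port: the flatMap of the constant lists evaluates to the literal 9-key list
lemma pvB_unfold (story : List (String × List (List (String × String)))) :
    count_behaviors_9_categories_alt story =
    pvKeys9.map (fun key =>
      (key, (pvGetBehaviors story).foldl (fun s b => if pvKeyOf b == key then s + 1 else s) (0 : Int))) := rfl

-- B's per-key fold is the count of matching behavior keys
lemma pvB_count (bs : List (List (String × String))) (k : String) (s : Int) :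
    bs.foldl (fun s b => if pvKeyOf b == k then s + 1 else s) s =
    s + ((bs.map pvKeyOf).count k) := by
  induction bs generalizing s with
  | nil => simp
  | cons b bs ih =>
      simp only [List.foldl_cons, List.map_cons]
      by_cases h : pvKeyOf b = k
      · rw [if_pos (by simpa using h), ih]
        simp [h]; ring
      · rw [if_neg (by simpa using h), ih]
        simp [h]

-- A's counting loop keeps the key list unchanged
lemma pvKeys_fold (bs : List (List (String × String))) (d : PySem.Dict String Int) :
    (bs.foldl pvStepA d).keys = d.keys := by
  induction bs generalizing d with
  | nil => rfl
  | cons b bs ih =>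
      simp only [List.foldl_cons]
      by_cases h : d.contains (pvKeyOf b)
      · rw [show pvStepA d b = d.modify (pvKeyOf b) 0 (· + 1) from by simp [pvStepA, h],
           ih, PySem.Dict.keys_modify, PySem.Dict.keys_insert_of_contains _ _ h]
      · rw [show pvStepA d b = d from by simp [pvStepA, h], ih]

-- A's counting loop adds, at each key present in d, the number of behaviors with that key
lemma pvGetD_fold (bs : List (List (String × String))) (d : PySem.Dict String Int)
    (k : String) (hk : k ∈ d.keys) :
    (bs.foldl pvStepA d).getD k 0 = d.getD k 0 + ((bs.map pvKeyOf).count k) := by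
  induction bs generalizing d with
  | nil => simp
  | cons b bs ih =>
      simp only [List.foldl_cons, List.map_cons]
      by_cases h : d.contains (pvKeyOf b)
      · rw [show pvStepA d b = d.modify (pvKeyOf b) 0 (· + 1) from by simp [pvStepA, h]]
        have hk' : k ∈ (d.modify (pvKeyOf b) 0 (· + 1)).keys := by
          rw [PySem.Dict.keys_modify, PySem.Dict.keys_insert_of_contains _ _ h]; exact hk
        rw [ih _ hk', PySem.Dict.getD_modify]
        by_cases hkb : k = pvKeyOf b
        · subst hkb; simp; ring
        · simp [hkb, Ne.symm hkb]
      · have hkb : pvKeyOf b ≠ k := by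
          intro he
          exact h (by rw [he]; exact (PySem.Dict.contains_iff_mem_keys d k).2 hk)
        rw [show pvStepA d b = d from by simp [pvStepA, h], ih _ hk]
        simp [hkb]

-- ===== VERDICT (by name: the statement is the Claim_ definition above) =====
theorem count_behaviors_9_categories_spec : Claim_equal_count_behaviors_9_categories := by
  intro story _
  unfold Spec_count_behaviors_9_categories
  rw [pvA_unfold, pvB_unfold]
  set bs := pvGetBehaviors story with hbs
  set d0 : PySem.Dict String Int := PySem.Dict.mk (pvKeys9.map (fun k => (k, (0 : Int)))) with hd0
  have hkeys0 : d0.keys = pvKeys9 := by rw [hd0]; decide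
  have hnd : (bs.foldl pvStepA d0).keys.Nodup := by
    rw [pvKeys_fold, hkeys0]; decide
  rw [PySem.Dict.items_eq_map_keys _ hnd 0, pvKeys_fold, hkeys0]
  apply List.map_congr_left
  intro k hk
  have h1 := pvGetD_fold bs d0 k (by rw [hkeys0]; exact hk)
  rw [h1, pvB_count]
  have h0 : d0.getD k 0 = 0 := by
    rw [hd0]; fin_cases hk <;> decide
  rw [h0]
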